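-- pv_equiv track=rewrite | github.com/dado3212/cell-tower-solver | Words.py | chunk_matches_word
-- ===== SOURCE A (Python) =====
-- from typing import List, Dict, Any
--
-- def chunk_matches_word(word: str, chunks: List[str]) -> bool:
--     # Quick and fast pass which filters a lot of options
--     for chunk in chunks:
--         if chunk not in word:
--             return False
--     # Acutally make sure the pieces fit
--     last_index = -1
--     for chunk in chunks:
--         if (last_index == -1):
--             i = word.find(chunk)
--         else:
--             i = word.find(chunk, last_index)
--         if i == -1 or last_index == -1 and i > 0:
--             return False
--         last_index = i + len(chunk)
--     return True
-- ===== SOURCE B (Python) =====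
-- def _fits(s, chunks):
--     # place each chunk at its earliest occurrence, then keep matching in the suffix
--     if not chunks:
--         return True
--     j = s.find(chunks[0])
--     if j == -1:
--         return False
--     return _fits(s[j + len(chunks[0]):], chunks[1:])
--
-- def chunk_matches_word(word, chunks):
--     if not chunks:
--         return True
--     if not word.startswith(chunks[0]):
--         return False
--     return _fits(word[len(chunks[0]):], chunks[1:])
-- ===== Notes on version B (the rewrite author's own statement) =====
-- stated objective: simpler
-- what changed: B drops A's redundant membership pre-filter pass entirely and replaces the index-pointer loop with its -1 sentinel and find(chunk, last_index) calls by a structural recursion that checks the first chunk with startswith and then repeatedly slices the word after each chunk's earliest occurrence.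
import Mathlib
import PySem

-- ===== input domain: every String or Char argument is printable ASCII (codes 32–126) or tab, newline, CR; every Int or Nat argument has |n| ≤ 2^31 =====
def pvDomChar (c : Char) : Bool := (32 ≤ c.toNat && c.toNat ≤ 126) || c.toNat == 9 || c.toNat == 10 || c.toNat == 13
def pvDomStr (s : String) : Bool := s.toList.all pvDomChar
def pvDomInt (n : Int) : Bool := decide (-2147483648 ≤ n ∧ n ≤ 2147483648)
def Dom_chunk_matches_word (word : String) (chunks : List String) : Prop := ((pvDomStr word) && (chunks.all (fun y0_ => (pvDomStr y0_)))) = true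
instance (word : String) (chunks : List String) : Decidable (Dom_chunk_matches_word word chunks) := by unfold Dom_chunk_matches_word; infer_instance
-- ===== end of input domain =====

-- B drops A's redundant membership pre-filter and replaces the index-pointer loop
-- (with its -1 sentinel) by a structural recursion that slices off each matched
-- chunk's earliest occurrence; objective: simpler.


-- ===== PORT A =====
-- first loop: "for chunk in chunks: if chunk not in word: return False"
def pvA_filter (word : List Char) (chunks : List String) : Bool :=
  match chunks with
  | [] => true
  | c :: rest =>
    if PySem.Chars.isIn c.toList word then pvA_filter word rest else false

-- second loop with its last_index pointer (last_index == -1 marks the first pass)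
def pvA_fit (word : List Char) (chunks : List String) (lastIndex : Int) : Bool :=
  match chunks with
  | [] => true
  | c :: rest =>
    let i : Int :=
      if lastIndex = -1 then PySem.Chars.find word c.toList
      else PySem.Chars.findFrom word c.toList lastIndex none
    if i = -1 || (lastIndex = -1 && decide (i > 0)) then false
    else pvA_fit word rest (i + (c.toList.length : Int))

def chunk_matches_word (word : String) (chunks : List String) : Bool :=
  if pvA_filter word.toList chunks then pvA_fit word.toList chunks (-1) else false

-- ===== PORT B =====
-- _fits: s.find(c) then recurse on the suffix s[j+len(c):] (j ≥ 0, so the slice is a drop — exact)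
def pvB_fits (s : List Char) (chunks : List String) : Bool :=
  match chunks with
  | [] => true
  | c :: rest =>
    let j : Int := PySem.Chars.find s c.toList
    if j = -1 then false
    else pvB_fits (s.drop (j.toNat + c.toList.length)) rest

def chunk_matches_word_alt (word : String) (chunks : List String) : Bool :=
  match chunks with
  | [] => true
  | c :: rest =>
    if PySem.Chars.startswith word.toList c.toList then
      pvB_fits (word.toList.drop c.toList.length) rest
    else false

-- ===== PRECONDITION & SPEC =====
def Spec_chunk_matches_word (word : String) (chunks : List String) (out : Bool) : Prop := out = chunk_matches_word_alt word chunks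
instance (word : String) (chunks : List String) (out : Bool) : Decidable (Spec_chunk_matches_word word chunks out) := by unfold Spec_chunk_matches_word; infer_instance

-- ===== CLAIM (what is proved, stated in full; the proofs are below) =====
def Claim_equal_chunk_matches_word : Prop := ∀ (word : String) (chunks : List String), Dom_chunk_matches_word word chunks → Spec_chunk_matches_word word chunks (chunk_matches_word word chunks)

-- ===== LEMMAS AND PROOFS =====

-- find s p = 0 ↔ p is a prefix of s
lemma pvFind_zero_iff (s p : List Char) :
    PySem.Chars.find s p = 0 ↔ p <+: s := by
  constructor
  · intro h
    have := PySem.Chars.find_spec (s := s) (sub := p) (by omega)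
    simpa [h] using this.1
  · intro hp
    have hne : PySem.Chars.find s p ≠ -1 := by
      rw [PySem.Chars.find_ne_neg_one_iff]
      exact hp.isInfix
    have hnn : 0 ≤ PySem.Chars.find s p := by
      have := PySem.Chars.neg_one_le_find (s := s) (sub := p)
      omega
    have hsp := PySem.Chars.find_spec (s := s) (sub := p) hnn
    by_contra hne0
    have hpos : 0 < (PySem.Chars.find s p).toNat := by omega
    have := hsp.2 0 hpos
    simp at this
    exact this hp

-- the pointer loop from a nonnegative in-range start equals B's suffix recursion
lemma pvFit_eq_fits (chunks : List String) (word : List Char) (k : Nat)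
    (hk : k ≤ word.length) :
    pvA_fit word chunks (k : Int) = pvB_fits (word.drop k) chunks := by
  induction chunks generalizing k with
  | nil => simp [pvA_fit, pvB_fits]
  | cons c rest ih =>
    have hk1 : ¬ ((k : Int) = -1) := by omega
    simp only [pvA_fit, pvB_fits, hk1, if_false]
    rw [PySem.Chars.findFrom_natCast word c.toList k hk]
    by_cases hf : PySem.Chars.find (word.drop k) c.toList = -1
    · simp [hf]
    · have hnn : 0 ≤ PySem.Chars.find (word.drop k) c.toList := by
        have := PySem.Chars.neg_one_le_find (s := word.drop k) (sub := c.toList)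
        omega
      have hsp := PySem.Chars.find_spec (s := word.drop k) (sub := c.toList) hnn
      have hlen := hsp.1.length_le
      rw [List.length_drop, List.length_drop] at hlen
      have hfl := PySem.Chars.find_le_length (s := word.drop k) (sub := c.toList)
      rw [List.length_drop] at hfl
      have hk' : k + ((PySem.Chars.find (word.drop k) c.toList).toNat + c.toList.length)
          ≤ word.length := by omega
      have hne2 : ¬ ((k : Int) + PySem.Chars.find (word.drop k) c.toList = -1) := by omega
      simp only [hf, if_false, hne2, decide_false, Bool.false_and,
        Bool.or_false, Bool.false_eq_true]
      have hcast : (k : Int) + PySem.Chars.find (word.drop k) c.toList + (c.toList.length : Int)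
          = ((k + ((PySem.Chars.find (word.drop k) c.toList).toNat + c.toList.length) : Nat) : Int) := by
        omega
      rw [hcast, ih _ hk', List.drop_drop, Nat.add_comm]

-- any chunk B places is an infix of s
lemma pvFits_infix (chunks : List String) (s : List Char)
    (h : pvB_fits s chunks = true) : ∀ c ∈ chunks, c.toList <:+: s := by
  induction chunks generalizing s with
  | nil => intro c hc; cases hc
  | cons c0 rest ih =>
    intro c hc
    simp only [pvB_fits] at h
    by_cases hf : PySem.Chars.find s c0.toList = -1
    · simp [hf] at h
    · simp only [hf, if_false] at h
      rcases List.mem_cons.mp hc with hc0 | hc0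
      · subst hc0
        have := PySem.Chars.find_ne_neg_one_iff (s := s) (sub := c.toList)
        exact this.mp hf
      · have := ih _ h c hc0
        exact this.trans (List.drop_suffix _ _).isInfix

-- the pre-filter succeeds when every chunk is an infix
lemma pvFilter_of_all (chunks : List String) (word : List Char)
    (h : ∀ c ∈ chunks, c.toList <:+: word) : pvA_filter word chunks = true := by
  induction chunks with
  | nil => rfl
  | cons c rest ih =>
    simp only [pvA_filter]
    rw [if_pos]
    · exact ih (fun c' hc' => h c' (List.mem_cons_of_mem _ hc'))
    · exact (PySem.Chars.isIn_iff_infix _ _).mpr (h c (List.mem_cons_self ..))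

-- A's pointer loop started at -1 computes exactly B's result
lemma pvFit_eq_alt (word : String) (chunks : List String) :
    pvA_fit word.toList chunks (-1) = chunk_matches_word_alt word chunks := by
  cases chunks with
  | nil => rfl
  | cons c rest =>
    simp only [pvA_fit, chunk_matches_word_alt]
    by_cases hs : PySem.Chars.startswith word.toList c.toList = true
    · have hp : c.toList <+: word.toList := (PySem.Chars.startswith_iff _ _).mp hs
      have hf0 : PySem.Chars.find word.toList c.toList = 0 := (pvFind_zero_iff _ _).mpr hp
      simp only [hs, if_true, hf0]
      norm_num
      have hlen : c.toList.length ≤ word.toList.length := hp.length_le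
      have := pvFit_eq_fits rest word.toList c.toList.length hlen
      simpa using this
    · have hp : ¬ c.toList <+: word.toList := fun hp => hs ((PySem.Chars.startswith_iff _ _).mpr hp)
      have hf0 : PySem.Chars.find word.toList c.toList ≠ 0 := fun h => hp ((pvFind_zero_iff _ _).mp h)
      have hge := PySem.Chars.neg_one_le_find (s := word.toList) (sub := c.toList)
      have : (PySem.Chars.find word.toList c.toList = -1) ∨ PySem.Chars.find word.toList c.toList > 0 := by omega
      simp only [hs]
      rcases this with h1 | h1 <;> simp [h1]

lemma pvMain (word : String) (chunks : List String) :
    chunk_matches_word word chunks = chunk_matches_word_alt word chunks := by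
  unfold chunk_matches_word
  rw [pvFit_eq_alt]
  by_cases hv : chunk_matches_word_alt word chunks = true
  · have hfil : pvA_filter word.toList chunks = true := by
      apply pvFilter_of_all
      intro c hc
      cases chunks with
      | nil => cases hc
      | cons c0 rest =>
        simp only [chunk_matches_word_alt] at hv
        by_cases hs : PySem.Chars.startswith word.toList c0.toList = true
        · simp only [hs, if_true] at hv
          have hp : c0.toList <+: word.toList := (PySem.Chars.startswith_iff _ _).mp hs
          rcases List.mem_cons.mp hc with hc0 | hc0
          · subst hc0; exact hp.isInfix
          · have := pvFits_infix rest _ hv c hc0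
            exact this.trans (List.drop_suffix _ _).isInfix
        · simp [hs] at hv
    rw [if_pos hfil]
  · simp only [Bool.not_eq_true] at hv
    rw [hv]
    split <;> rfl

-- ===== VERDICT (by name: the statement is the Claim_ definition above) =====
theorem chunk_matches_word_spec : Claim_equal_chunk_matches_word := by
  intro word chunks _
  unfold Spec_chunk_matches_word
  exact pvMain word chunks
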